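-- pv_equiv track=rewrite | github.com/lebalz/dokku-keeper | lib/helpers.py | sanitize_job_name
-- ===== SOURCE A (Python) =====
-- def sanitize_job_name(name: str) -> str:
--     jn = str(name)
--     jn = jn.replace('/', '_')
--     jn = jn.replace(' ', '')
--     jn = jn.replace('-', '_')
--     while jn.startswith('_'):
--         jn = jn[1:]
--     while jn.endswith('_'):
--         jn = jn[:-1]
--     return jn.lower()
-- ===== SOURCE B (Python) =====
-- def sanitize_job_name(name: str) -> str:
--     out = []
--     for c in str(name):
--         if c == '/' or c == '-':
--             out.append('_')
--         elif c != ' ':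
--             out.append(c)
--     return ''.join(out).strip('_').lower()
-- ===== Notes on version B (the rewrite author's own statement) =====
-- stated objective: alternative
-- what changed: One character-by-character pass building the result list replaces the three separate full-string replace passes and the two slicing while-loops, followed by a single strip of boundary underscores; same result by a single-traversal decomposition.
import Mathlib
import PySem

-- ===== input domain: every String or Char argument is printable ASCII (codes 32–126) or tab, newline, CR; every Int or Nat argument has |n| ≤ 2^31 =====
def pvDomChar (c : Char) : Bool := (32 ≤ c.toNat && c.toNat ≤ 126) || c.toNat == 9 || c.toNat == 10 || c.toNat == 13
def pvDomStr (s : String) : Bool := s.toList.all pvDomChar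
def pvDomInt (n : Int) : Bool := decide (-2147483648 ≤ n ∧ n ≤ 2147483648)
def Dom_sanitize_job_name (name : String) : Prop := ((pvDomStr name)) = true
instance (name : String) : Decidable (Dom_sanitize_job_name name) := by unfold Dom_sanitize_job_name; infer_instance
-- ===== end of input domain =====

-- B replaces A's three full-string replace passes and two while-strip slicing loops by one
-- character pass plus a single strip of boundary underscores; objective: alternative decomposition.

-- ===== PORT A =====
-- while jn.startswith('_'): jn = jn[1:]   (jn[1:] of a non-empty list is its tail)
def pvLstripA : List Char → List Char
  | [] => []
  | c :: t => if PySem.Chars.startswith (c :: t) ['_'] then pvLstripA t else c :: t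

-- while jn.endswith('_'): jn = jn[:-1]   (jn[:-1] is dropLast)
def pvRstripA (l : List Char) : List Char :=
  if PySem.Chars.endswith l ['_'] then pvRstripA l.dropLast else l
termination_by l.length
decreasing_by
  have hne : l ≠ [] := by
    intro h; subst h
    simp [PySem.Chars.endswith, List.isSuffixOf] at *
  cases l with
  | nil => exact absurd rfl hne
  | cons a t => simp

def sanitize_job_name (name : String) : String :=
  let jn := name
  let jn := PySem.Str.replace jn "/" "_"
  let jn := PySem.Str.replace jn " " ""
  let jn := PySem.Str.replace jn "-" "_"
  let jn := String.ofList (pvRstripA (pvLstripA jn.toList))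
  PySem.Str.lower jn

-- ===== PORT B =====
def sanitize_job_name_alt (name : String) : String :=
  let out := name.toList.foldl
    (fun acc c =>
      if c = '/' ∨ c = '-' then acc ++ ['_']
      else if c ≠ ' ' then acc ++ [c] else acc) []
  PySem.Str.lower (PySem.Str.stripChars (String.ofList out) "_")

-- ===== PRECONDITION & SPEC =====
def Spec_sanitize_job_name (name : String) (out : String) : Prop := out = sanitize_job_name_alt name
instance (name : String) (out : String) : Decidable (Spec_sanitize_job_name name out) := by unfold Spec_sanitize_job_name; infer_instance

-- ===== CLAIM (what is proved, stated in full; the proofs are below) =====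
def Claim_equal_sanitize_job_name : Prop := ∀ (name : String), Dom_sanitize_job_name name → Spec_sanitize_job_name name (sanitize_job_name name)

-- ===== LEMMAS AND PROOFS =====

-- single-character old: replace is a flatMap
theorem pv_replace_go_single (c : Char) (new : List Char) :
    ∀ (fuel : Nat) (s acc : List Char), s.length ≤ fuel →
      PySem.Chars.replace.go [c] new fuel s acc
        = acc.reverse ++ s.flatMap (fun x => if x = c then new else [x]) := by
  intro fuel
  induction fuel with
  | zero =>
    intro s acc h
    have : s = [] := List.length_eq_zero_iff.mp (Nat.le_zero.mp h)
    subst this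
    simp [PySem.Chars.replace.go]
  | succ n ih =>
    intro s acc h
    cases s with
    | nil => simp [PySem.Chars.replace.go]
    | cons a t =>
      simp only [PySem.Chars.replace.go]
      by_cases hac : a = c
      · subst hac
        have hp : List.isPrefixOf [a] (a :: t) = true := by
          simp [List.isPrefixOf]
        rw [if_pos hp]
        simp only [List.length_cons, List.length_nil, List.drop_succ_cons, List.drop_zero]
        rw [ih t (new.reverse ++ acc) (by simpa using Nat.lt_succ_iff.mp (by simpa using h))]
        simp
      · have hp : List.isPrefixOf [c] (a :: t) = false := by
          simp only [List.isPrefixOf, Bool.and_eq_false_iff, beq_eq_false_iff_ne, ne_eq]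
          exact Or.inl (fun h' => hac h'.symm)
        rw [if_neg (by simp [hp])]
        rw [ih t (a :: acc) (by simpa using Nat.lt_succ_iff.mp (by simpa using h))]
        simp [hac]

theorem pv_replace_single (c : Char) (new s : List Char) :
    PySem.Chars.replace s [c] new = s.flatMap (fun x => if x = c then new else [x]) := by
  simp only [PySem.Chars.replace, List.isEmpty_cons, if_false, Bool.false_eq_true]
  simpa using pv_replace_go_single c new s.length s [] (le_refl _)

-- A's three replace passes fused into one flatMap
theorem pv_replaced_eq (l : List Char) :
    PySem.Chars.replace (PySem.Chars.replace (PySem.Chars.replace l ['/'] ['_']) [' '] []) ['-'] ['_']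
      = l.flatMap (fun c =>
          if c = '/' ∨ c = '-' then ['_'] else if c ≠ ' ' then [c] else []) := by
  simp only [pv_replace_single, List.flatMap_assoc]
  congr 1
  funext c
  by_cases h1 : c = '/' <;> by_cases h2 : c = '-' <;> by_cases h3 : c = ' ' <;>
    simp_all

-- B's foldl builds the same flatMap
theorem pv_foldl_eq (l acc : List Char) :
    l.foldl
      (fun acc c =>
        if c = '/' ∨ c = '-' then acc ++ ['_']
        else if c ≠ ' ' then acc ++ [c] else acc) acc
      = acc ++ l.flatMap (fun c =>
          if c = '/' ∨ c = '-' then ['_'] else if c ≠ ' ' then [c] else []) := by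
  induction l generalizing acc with
  | nil => simp
  | cons a t ih =>
    simp only [List.foldl_cons, List.flatMap_cons, ih]
    by_cases h1 : a = '/' ∨ a = '-' <;> by_cases h2 : a = ' ' <;> simp_all

-- A's leading-underscore loop is dropWhile
theorem pv_lstrip_eq (l : List Char) :
    pvLstripA l = l.dropWhile (fun c => (['_'] : List Char).contains c) := by
  induction l with
  | nil => rfl
  | cons a t ih =>
    simp only [pvLstripA, List.dropWhile_cons]
    by_cases h : a = '_'
    · subst h
      simp [PySem.Chars.startswith, List.isPrefixOf, ih]
    · have hs : PySem.Chars.startswith (a :: t) ['_'] = false := by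
        simp only [PySem.Chars.startswith, List.isPrefixOf, Bool.and_eq_false_iff,
          beq_eq_false_iff_ne, ne_eq]
        exact Or.inl (fun h' => h h'.symm)
      simp only [hs, Bool.false_eq_true, if_false]
      simp [h]

-- A's trailing-underscore loop is dropWhile on the reverse
theorem pv_rstrip_eq (l : List Char) :
    pvRstripA l = (l.reverse.dropWhile (fun c => (['_'] : List Char).contains c)).reverse := by
  induction l using List.reverseRecOn with
  | nil =>
    rw [pvRstripA]
    simp [PySem.Chars.endswith, List.isSuffixOf]
  | append_singleton xs x ih =>
    rw [pvRstripA]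
    by_cases h : x = '_'
    · subst h
      have he : PySem.Chars.endswith (xs ++ ['_']) ['_'] = true := by
        simp [PySem.Chars.endswith, List.isSuffixOf_iff_suffix]
      rw [if_pos he, List.dropLast_concat, ih]
      simp
    · have he : PySem.Chars.endswith (xs ++ [x]) ['_'] = false := by
        simp only [PySem.Chars.endswith]
        rw [Bool.eq_false_iff]
        intro hs
        have h2 := List.isSuffixOf_iff_suffix.mp hs
        rw [List.suffix_concat_iff] at h2
        rcases h2 with h2 | ⟨t, ht, -⟩
        · simp at h2
        · cases t
          · exact h (by simpa using ht.symm)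
          · simp_all
      rw [if_neg (by simp [he])]
      simp [h]

-- ===== VERDICT (by name: the statement is the Claim_ definition above) =====
theorem sanitize_job_name_spec : Claim_equal_sanitize_job_name := by
  intro name _
  unfold Spec_sanitize_job_name sanitize_job_name sanitize_job_name_alt
  apply congrArg PySem.Str.lower
  apply String.toList_inj.mp
  rw [PySem.Str.toList_stripChars, String.toList_ofList, String.toList_ofList,
    PySem.Str.toList_replace, PySem.Str.toList_replace, PySem.Str.toList_replace]
  have h1 : ("/" : String).toList = ['/'] := rfl
  have h2 : (" " : String).toList = [' '] := rfl
  have h3 : ("-" : String).toList = ['-'] := rfl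
  have h4 : ("" : String).toList = ([] : List Char) := rfl
  have h5 : ("_" : String).toList = ['_'] := rfl
  rw [h1, h2, h3, h4, h5, pv_replaced_eq, pv_foldl_eq, List.nil_append]
  rw [pv_rstrip_eq, pv_lstrip_eq]
  rfl
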